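-- pv_equiv track=rewrite | github.com/digwit678/OpenEvent-AI-FORK | scripts/validate_manual_ux_run.py | _confirmation_hil
-- ===== SOURCE A (Python) =====
-- from typing import Any, Dict, List, Optional
--
-- def _confirmation_hil(records: List[Dict[str, Any]]) -> bool:
--     for idx, rec in enumerate(records):
--         if (rec.get('action') or '').lower() == 'confirmation_finalized':
--             if 'hil' not in (rec.get('msg_id') or '').lower():
--                 continue
--             prior = records[:idx]
--             if any((p.get('action') or '').lower() in {
--                 'transition_ready',
--                 'confirmation_draft',
--                 'confirmation_deposit_requested',
--                 'confirmation_reserve',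
--                 'confirmation_site_visit',
--                 'confirmation_deposit_notified',
--             } for p in prior):
--                 return True
--     return False
-- ===== SOURCE B (Python) =====
-- from typing import Any, Dict, List, Optional
--
-- _TRIGGERS = {
--     'transition_ready',
--     'confirmation_draft',
--     'confirmation_deposit_requested',
--     'confirmation_reserve',
--     'confirmation_site_visit',
--     'confirmation_deposit_notified',
-- }
--
-- def _confirmation_hil(records: List[Dict[str, Any]]) -> bool:
--     seen_trigger = False
--     for rec in records:
--         action = (rec.get('action') or '').lower()
--         if (seen_trigger
--                 and action == 'confirmation_finalized'
--                 and 'hil' in (rec.get('msg_id') or '').lower()):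
--             return True
--         if action in _TRIGGERS:
--             seen_trigger = True
--     return False
-- ===== Notes on version B (the rewrite author's own statement) =====
-- stated objective: alternative
-- what changed: Replaced the rescan of records[:idx] inside the loop (any over the whole prefix for each matching finalized record) by a single forward pass carrying one running boolean 'a trigger action was seen earlier'.
import Mathlib
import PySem

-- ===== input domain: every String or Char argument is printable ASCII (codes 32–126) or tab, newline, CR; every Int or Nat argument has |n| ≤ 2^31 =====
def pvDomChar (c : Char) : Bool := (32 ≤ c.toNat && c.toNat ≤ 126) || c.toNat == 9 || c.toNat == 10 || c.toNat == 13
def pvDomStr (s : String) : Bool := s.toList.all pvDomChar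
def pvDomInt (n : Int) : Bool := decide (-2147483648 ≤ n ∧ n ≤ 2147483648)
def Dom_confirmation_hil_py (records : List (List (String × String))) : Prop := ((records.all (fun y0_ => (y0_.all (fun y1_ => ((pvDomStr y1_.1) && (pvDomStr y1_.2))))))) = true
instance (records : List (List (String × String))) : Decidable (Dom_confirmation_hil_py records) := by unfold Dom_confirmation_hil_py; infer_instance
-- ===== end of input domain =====

-- B replaces A's per-hit rescan of the prefix (records[:idx]) by a single forward pass
-- carrying a running "trigger seen earlier" boolean.


-- ===== PORT A =====
-- (rec.get(k) or '').lower(); since values are strings, 'x or ""' is the identity on the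
-- looked-up string and maps a missing key to "", which is exactly getD _ k "".
def pvGetLower (rec : List (String × String)) (k : String) : String :=
  PySem.Str.lower ((PySem.Dict.mk rec).getD k "")

def pvTriggers : List String :=
  ["transition_ready", "confirmation_draft", "confirmation_deposit_requested",
   "confirmation_reserve", "confirmation_site_visit", "confirmation_deposit_notified"]

-- the 'for idx, rec in enumerate(records)' loop of A, with its early return
def pvLoopA (records : List (List (String × String))) :
    List (Int × List (String × String)) → Bool
  | [] => false
  | (idx, rec) :: rest =>
    if pvGetLower rec "action" == "confirmation_finalized" then
      if !(PySem.Str.isIn "hil" (pvGetLower rec "msg_id")) then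
        pvLoopA records rest          -- continue
      else if (PySem.List.slice records none (some idx)).any
                (fun p => pvTriggers.contains (pvGetLower p "action")) then
        true
      else
        pvLoopA records rest
    else
      pvLoopA records rest

def confirmation_hil_py (records : List (List (String × String))) : Bool :=
  pvLoopA records (PySem.List.enumerate records 0)

-- ===== PORT B =====
-- B's loop: one pass, 'seen' = a trigger action occurred strictly earlier
def pvLoopB : Bool → List (List (String × String)) → Bool
  | _, [] => false
  | seen, rec :: rest =>
    let action := pvGetLower rec "action"
    if seen && action == "confirmation_finalized" &&
        PySem.Str.isIn "hil" (pvGetLower rec "msg_id") then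
      true
    else
      pvLoopB (seen || pvTriggers.contains action) rest

def confirmation_hil_py_alt (records : List (List (String × String))) : Bool :=
  pvLoopB false records

-- ===== PRECONDITION & SPEC =====
def Spec_confirmation_hil_py (records : List (List (String × String))) (out : Bool) : Prop := out = confirmation_hil_py_alt records
instance (records : List (List (String × String))) (out : Bool) : Decidable (Spec_confirmation_hil_py records out) := by unfold Spec_confirmation_hil_py; infer_instance

-- ===== CLAIM (what is proved, stated in full; the proofs are below) =====
def Claim_equal_confirmation_hil_py : Prop := ∀ (records : List (List (String × String))), Dom_confirmation_hil_py records → Spec_confirmation_hil_py records (confirmation_hil_py records)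

-- ===== LEMMAS AND PROOFS =====

-- a record whose action is 'confirmation_finalized' is never a trigger
lemma pv_not_trigger_of_final (rec : List (String × String))
    (h : pvGetLower rec "action" == "confirmation_finalized") :
    pvTriggers.contains (pvGetLower rec "action") = false := by
  rw [eq_of_beq h]; decide

-- loop invariant: A on the suffix (indexed from |pre|) equals B with seen = "pre holds a trigger"
lemma pv_loop_eq (rest pre : List (List (String × String))) :
    pvLoopA (pre ++ rest) (PySem.List.enumerate rest (pre.length : Int)) =
      pvLoopB (pre.any (fun p => pvTriggers.contains (pvGetLower p "action"))) rest := by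
  induction rest generalizing pre with
  | nil => simp [pvLoopA, pvLoopB, PySem.List.enumerate]
  | cons rec rest ih =>
    have hslice : PySem.List.slice (pre ++ rec :: rest) none (some (pre.length : Int)) = pre := by
      rw [PySem.List.slice_to_natCast]
      simp [List.take_left (l₁ := pre) (l₂ := rec :: rest)]
    have hlen : ((pre.length : Int) + 1) = (((pre ++ [rec]).length : Int)) := by simp
    have hassoc : pre ++ rec :: rest = (pre ++ [rec]) ++ rest := by simp
    have hihe := ih (pre ++ [rec])
    simp only [List.any_append, List.any_cons, List.any_nil, Bool.or_false] at hihe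
    rw [PySem.List.enumerate_cons]
    by_cases hf : pvGetLower rec "action" == "confirmation_finalized"
    · have htrig := pv_not_trigger_of_final rec hf
      rw [htrig, Bool.or_false] at hihe
      by_cases hh : PySem.Str.isIn "hil" (pvGetLower rec "msg_id")
      · cases hseen : pre.any (fun p => pvTriggers.contains (pvGetLower p "action")) with
        | true =>
          simp only [pvLoopA, pvLoopB, hf, hh, hslice, hseen, Bool.not_true,
            Bool.false_eq_true, if_false, if_true, Bool.and_self]
        | false =>
          rw [hseen] at hihe
          simp only [pvLoopA, pvLoopB, hf, hh, hslice, hseen, Bool.not_true,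
            Bool.false_eq_true, if_false, Bool.false_and, htrig, Bool.or_false, ite_self]
          rw [hlen, hassoc]
          exact hihe
      · rw [Bool.not_eq_true] at hh
        simp only [pvLoopA, pvLoopB, hf, hh, Bool.not_false, if_true,
          Bool.and_false, Bool.false_eq_true, if_false, htrig, Bool.or_false]
        rw [hlen, hassoc]
        exact hihe
    · rw [Bool.not_eq_true] at hf
      simp only [pvLoopA, pvLoopB, hf, Bool.false_eq_true, if_false,
        Bool.false_and, Bool.and_false]
      rw [hlen, hassoc]
      exact hihe

-- ===== VERDICT (by name: the statement is the Claim_ definition above) =====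
theorem confirmation_hil_py_spec : Claim_equal_confirmation_hil_py := by
  intro records _
  have h := pv_loop_eq records []
  simpa [confirmation_hil_py, confirmation_hil_py_alt, Spec_confirmation_hil_py] using h
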